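-- pv_equiv track=rewrite | github.com/Wos2610/Python | PYKT088.py | check
-- ===== SOURCE A (Python) =====
-- import math
--
-- def check(m):
--     res = 1
--     for i in range(2, int(math.sqrt(m)) + 1):
--         if m % i == 0:
--             d = 0
--             while m % i == 0:
--                 m //= i
--                 d += 1
--             res *= (d + 1)
--             if res > 9: return False
--         if m == 1: break
--
--     if m > 1: res *= 2
--     if res == 9: return True
--     else: return False
-- ===== SOURCE B (Python) =====
-- import math
--
-- def check(m):
--     count = 0
--     for i in range(1, int(math.sqrt(m)) + 1):
--         if m % i == 0:
--             count += 1
--             if i != m // i: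
--                 count += 1
--     return count == 9
-- ===== Notes on version B (the rewrite author's own statement) =====
-- stated objective: alternative
-- what changed: B counts the divisors directly in cofactor pairs (i, m//i) for i up to int(sqrt(m)) and tests count == 9, instead of A's prime factorisation multiplying (exponent+1) factors with early exit.
import Mathlib
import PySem

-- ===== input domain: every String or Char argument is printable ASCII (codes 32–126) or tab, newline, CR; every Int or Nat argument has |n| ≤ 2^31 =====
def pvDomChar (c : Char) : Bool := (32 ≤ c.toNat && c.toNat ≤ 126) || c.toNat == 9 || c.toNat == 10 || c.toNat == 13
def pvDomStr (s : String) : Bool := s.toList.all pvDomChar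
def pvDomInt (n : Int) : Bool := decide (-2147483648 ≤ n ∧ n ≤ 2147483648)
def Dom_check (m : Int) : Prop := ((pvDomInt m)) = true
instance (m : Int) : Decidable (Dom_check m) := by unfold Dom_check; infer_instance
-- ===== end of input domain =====

-- B replaces A's prime-factorisation divisor count by a direct paired enumeration of
-- divisors up to int(math.sqrt(m)); same O(sqrt m) cost, a different algorithm.
-- Both Pythons raise ValueError (math.sqrt) on m < 0, hence Pre_check. On the admitted
-- domain (0 ≤ m ≤ 2^31) int(math.sqrt(m)) equals the integer square root, ported as Nat.sqrt.


-- ===== PORT A =====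
-- int(math.sqrt(m)): exact on the admitted domain 0 ≤ m ≤ 2^31
def pvISqrt (m : Int) : Int := (Nat.sqrt m.toNat : Int)

-- the inner 'while m % i == 0: m //= i; d += 1' (fuel = current m, enough since i ≥ 2)
def pvDivOut : Nat → Int → Int → Int × Int
  | 0, m, _ => (m, 0)
  | fuel+1, m, i =>
    if PySem.Int.mod m i = 0 then
      let p := pvDivOut fuel (PySem.Int.floordiv m i) i
      (p.1, p.2 + 1)
    else (m, 0)

-- the 'for i in range(2, int(math.sqrt(m)) + 1)' loop; .inl = early 'return False'
def pvLoopA : List Int → Int → Int → Bool ⊕ (Int × Int)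
  | [], m, res => .inr (m, res)
  | i :: rest, m, res =>
    if PySem.Int.mod m i = 0 then
      let p := pvDivOut m.toNat m i
      let res' := res * (p.2 + 1)
      if 9 < res' then .inl false
      else if p.1 = 1 then .inr (p.1, res')
      else pvLoopA rest p.1 res'
    else if m = 1 then .inr (m, res)
    else pvLoopA rest m res

def check (m : Int) : Bool :=
  match pvLoopA (PySem.List.pyRange 2 (pvISqrt m + 1) 1) m 1 with
  | .inl b => b
  | .inr (m', res) =>
    let res2 := if 1 < m' then res * 2 else res
    decide (res2 = 9)

-- ===== PORT B =====
def check_alt (m : Int) : Bool :=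
  let count := (PySem.List.pyRange 1 (pvISqrt m + 1) 1).foldl
    (fun count i =>
      if PySem.Int.mod m i = 0 then
        -- count += 1, and one more for the paired cofactor when distinct
        if i ≠ PySem.Int.floordiv m i then (count + 1) + 1 else count + 1
      else count) 0
  decide (count = (9 : Int))

-- ===== PRECONDITION & SPEC =====
-- math.sqrt raises ValueError on m < 0 (in both A and B); nothing else is excluded.
def Pre_check (m : Int) : Prop := 0 ≤ m
instance (m : Int) : Decidable (Pre_check m) := by unfold Pre_check; infer_instance
def pvWitness_check : Int := 36

def Spec_check (m : Int) (out : Bool) : Prop := out = check_alt m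
instance (m : Int) (out : Bool) : Decidable (Spec_check m out) := by unfold Spec_check; infer_instance

-- ===== CLAIM (what is proved, stated in full; the proofs are below) =====
def Claim_equal_check : Prop := ∀ (m : Int), Dom_check m → Pre_check m → Spec_check m (check m)

-- ===== LEMMAS AND PROOFS =====

-- τ n = number of divisors
def pvTau (n : Nat) : Nat := n.divisors.card

-- Nat mirror of pvDivOut
def natDivOut : Nat → Nat → Nat → Nat × Nat
  | 0, m, _ => (m, 0)
  | fuel+1, m, i =>
    if m % i = 0 then
      let p := natDivOut fuel (m / i) i
      (p.1, p.2 + 1)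
    else (m, 0)

-- Nat mirror of pvLoopA
def natLoopA : List Nat → Nat → Nat → Bool ⊕ (Nat × Nat)
  | [], m, res => .inr (m, res)
  | i :: rest, m, res =>
    if m % i = 0 then
      let p := natDivOut m m i
      let res' := res * (p.2 + 1)
      if 9 < res' then .inl false
      else if p.1 = 1 then .inr (p.1, res')
      else natLoopA rest p.1 res'
    else if m = 1 then .inr (m, res)
    else natLoopA rest m res

def natFinish : Bool ⊕ (Nat × Nat) → Bool
  | .inl b => b
  | .inr (m, res) => decide ((if 1 < m then res * 2 else res) = 9)

theorem pvDivOut_cast (fuel : Nat) : ∀ (m i : Nat),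
    pvDivOut fuel (m : Int) (i : Int) =
      (((natDivOut fuel m i).1 : Int), ((natDivOut fuel m i).2 : Int)) := by
  induction fuel with
  | zero => intro m i; simp [pvDivOut, natDivOut]
  | succ f ih =>
    intro m i
    by_cases h : m % i = 0
    · have hm : PySem.Int.mod (m : Int) (i : Int) = 0 := by
        rw [PySem.Int.mod_natCast, h]; rfl
      have hf : PySem.Int.floordiv (m : Int) (i : Int) = ((m / i : Nat) : Int) :=
        PySem.Int.floordiv_natCast m i
      simp only [pvDivOut, natDivOut, hm, hf, h, if_true]
      rw [ih]; simp
    · have hm : PySem.Int.mod (m : Int) (i : Int) ≠ 0 := by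
        rw [PySem.Int.mod_natCast]; exact_mod_cast h
      simp only [pvDivOut, natDivOut, if_neg hm, if_neg h]; simp

theorem natLoopA_cast : ∀ (l : List Nat) (m res : Nat),
    pvLoopA (l.map (Nat.cast)) (m : Int) (res : Int) =
      (match natLoopA l m res with
       | .inl b => .inl b
       | .inr (m', res') => .inr ((m' : Int), (res' : Int))) := by
  intro l
  induction l with
  | nil => intro m res; simp [pvLoopA, natLoopA]
  | cons i rest ih =>
    intro m res
    by_cases h : m % i = 0
    · have hm : PySem.Int.mod (m : Int) (i : Int) = 0 := by
        rw [PySem.Int.mod_natCast, h]; rfl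
      simp only [List.map_cons, pvLoopA, natLoopA, hm, h, if_true, Int.toNat_natCast,
        pvDivOut_cast]
      set q := natDivOut m m i with hq
      by_cases h9 : 9 < res * (q.2 + 1)
      · have h9' : (9 : Int) < (res : Int) * ((q.2 : Int) + 1) := by exact_mod_cast h9
        simp [h9, h9']
      · have h9' : ¬ (9 : Int) < (res : Int) * ((q.2 : Int) + 1) := by exact_mod_cast h9
        by_cases h1 : q.1 = 1
        · have h1' : ((q.1 : Nat) : Int) = 1 := by exact_mod_cast h1
          simp [h9, h9', h1]
        · have h1' : ((q.1 : Nat) : Int) ≠ 1 := by exact_mod_cast h1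
          simp only [h9, h9', h1, h1', if_false]
          have := ih q.1 (res * (q.2 + 1))
          rw [show ((res : Int) * ((q.2 : Int) + 1)) = ((res * (q.2 + 1) : Nat) : Int) by
            push_cast; ring]
          exact this
    · have hm : PySem.Int.mod (m : Int) (i : Int) ≠ 0 := by
        rw [PySem.Int.mod_natCast]; exact_mod_cast h
      by_cases h1 : m = 1
      · have hi : i ≠ 1 := by intro e; rw [h1, e] at h; exact h rfl
        have h1' : ((m : Nat) : Int) = 1 := by exact_mod_cast h1
        simp only [List.map_cons, pvLoopA, natLoopA, if_neg hm, if_neg h, if_pos h1, if_pos h1']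
      · have h1' : ((m : Nat) : Int) ≠ 1 := by exact_mod_cast h1
        simp only [List.map_cons, pvLoopA, natLoopA, if_neg hm, if_neg h, if_neg h1, if_neg h1']
        exact ih m res

-- natDivOut specification
theorem natDivOut_spec : ∀ (fuel m i : Nat), 2 ≤ i → 1 ≤ m → m ≤ fuel →
    m = (natDivOut fuel m i).1 * i ^ (natDivOut fuel m i).2 ∧
    ¬ i ∣ (natDivOut fuel m i).1 ∧ 1 ≤ (natDivOut fuel m i).1 := by
  intro fuel
  induction fuel with
  | zero => intro m i _ h1 hle; omega
  | succ f ih =>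
    intro m i hi h1 hle
    by_cases h : m % i = 0
    · have hdvd : i ∣ m := Nat.dvd_of_mod_eq_zero h
      have hmi1 : 1 ≤ m / i := Nat.div_pos (Nat.le_of_dvd h1 hdvd) (by omega)
      have hlt : m / i < m := Nat.div_lt_self h1 (by omega)
      obtain ⟨e1, e2, e3⟩ := ih (m / i) i hi hmi1 (by omega)
      refine ⟨?_, ?_, ?_⟩ <;> simp only [natDivOut, h, if_true]
      · rw [pow_succ, ← mul_assoc, ← e1]
        exact (Nat.div_mul_cancel hdvd).symm
      · exact e2
      · exact e3
    · refine ⟨?_, ?_, ?_⟩ <;> simp only [natDivOut, h, if_false]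
      · simp
      · exact fun hd => h (Nat.mod_eq_zero_of_dvd hd)
      · exact h1

-- i with all prime factors of m ≥ i, i ∣ m, 2 ≤ i, is prime
theorem prime_of_min (i m : Nat) (h2 : 2 ≤ i) (hdvd : i ∣ m) (_h1 : 1 ≤ m)
    (hmin : ∀ p, p.Prime → p ∣ m → i ≤ p) : i.Prime := by
  have hp : i.minFac.Prime := Nat.minFac_prime (by omega)
  have hd : i.minFac ∣ m := dvd_trans (Nat.minFac_dvd i) hdvd
  have hge : i ≤ i.minFac := hmin _ hp hd
  have hle : i.minFac ≤ i := Nat.minFac_le (by omega)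
  exact Nat.prime_def_minFac.mpr ⟨h2, by omega⟩

-- coprimality from separated prime factors
theorem coprime_of_sep (a b i : Nat) (ha : ∀ p, p.Prime → p ∣ a → p < i)
    (hb : ∀ p, p.Prime → p ∣ b → i ≤ p) : Nat.Coprime a b := by
  by_contra hg
  have hp : (Nat.gcd a b).minFac.Prime := Nat.minFac_prime hg
  have hda : (Nat.gcd a b).minFac ∣ a := dvd_trans (Nat.minFac_dvd _) (Nat.gcd_dvd_left a b)
  have hdb : (Nat.gcd a b).minFac ∣ b := dvd_trans (Nat.minFac_dvd _) (Nat.gcd_dvd_right a b)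
  have := ha _ hp hda
  have := hb _ hp hdb
  omega

-- a divisor of n all of whose prime factors exceed sqrt n is 1 or prime
theorem prime_of_large_factors (n m : Nat) (hn : 1 ≤ n) (hm : m ∣ n) (h1 : 1 < m)
    (hlarge : ∀ p, p.Prime → p ∣ m → Nat.sqrt n < p) : m.Prime := by
  have hp : m.minFac.Prime := Nat.minFac_prime (by omega)
  have hpd : m.minFac ∣ m := Nat.minFac_dvd m
  have hpn : Nat.sqrt n < m.minFac := hlarge _ hp hpd
  have hq1 : 1 ≤ m / m.minFac := Nat.div_pos (Nat.le_of_dvd (by omega) hpd) hp.pos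
  by_cases hone : m / m.minFac = 1
  · have : m = m.minFac := by
      have h2 := Nat.div_mul_cancel hpd
      rw [hone] at h2; omega
    rw [this]; exact hp
  · exfalso
    have hq : (m / m.minFac).minFac.Prime := Nat.minFac_prime hone
    have hqd : (m / m.minFac).minFac ∣ m :=
      dvd_trans (Nat.minFac_dvd _) (Nat.div_dvd_of_dvd hpd)
    have hqn : Nat.sqrt n < (m / m.minFac).minFac := hlarge _ hq hqd
    have hqm : (m / m.minFac).minFac ≤ m / m.minFac := Nat.minFac_le (by omega)
    have hmn : m ≤ n := Nat.le_of_dvd hn hm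
    have hbig : Nat.succ (Nat.sqrt n) * Nat.succ (Nat.sqrt n) ≤ m := by
      calc Nat.succ (Nat.sqrt n) * Nat.succ (Nat.sqrt n)
          ≤ m.minFac * (m / m.minFac) :=
            Nat.mul_le_mul (by omega) (by omega)
        _ = m := Nat.mul_div_cancel' hpd
    have := Nat.lt_succ_sqrt n
    omega

-- τ of a prime power
theorem pvTau_prime_pow (p d : Nat) (hp : p.Prime) : pvTau (p ^ d) = d + 1 := by
  rw [pvTau, ← ArithmeticFunction.sigma_zero_apply,
    ArithmeticFunction.sigma_zero_apply_prime_pow hp]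

theorem pvTau_pos (n : Nat) (hn : n ≠ 0) : 1 ≤ pvTau n :=
  Finset.card_pos.mpr ⟨1, Nat.one_mem_divisors.mpr hn⟩

theorem pvTau_one : pvTau 1 = 1 := by decide

theorem pvTau_mul_eq (n m i : Nat) (_hn : 1 ≤ n) (hm : m ∣ n) (_h1 : 1 ≤ m)
    (hmin : ∀ p, p.Prime → p ∣ m → i ≤ p)
    (hmax : ∀ p, p.Prime → p ∣ (n / m) → p < i) :
    pvTau n = pvTau (n / m) * pvTau m := by
  have hco : Nat.Coprime (n / m) m := coprime_of_sep _ _ i hmax hmin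
  have hdm : n / m * m = n := Nat.div_mul_cancel hm
  have key := Nat.Coprime.card_divisors_mul hco
  unfold pvTau
  rw [← key, hdm]

-- main invariant for A's loop
theorem natLoopA_invariant (n : Nat) (hn : 1 ≤ n) : ∀ (cnt i m res : Nat), 2 ≤ i → 1 ≤ m →
    m ∣ n →
    (∀ p, p.Prime → p ∣ m → i ≤ p) →
    (∀ p, p.Prime → p ∣ (n / m) → p < i) →
    res = pvTau (n / m) →
    i + cnt = Nat.sqrt n + 1 →
    natFinish (natLoopA (List.range' i cnt) m res) = decide (pvTau n = 9) := by
  intro cnt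
  induction cnt with
  | zero =>
    intro i m res hi h1 hm hmin hmax hres hcnt
    simp only [List.range'_zero, natLoopA, natFinish]
    by_cases hm1 : 1 < m
    · have hprime : m.Prime := prime_of_large_factors n m hn hm hm1
        (fun p pp pd => by have := hmin p pp pd; omega)
      have htm : pvTau m = 2 := by
        rw [show m = m ^ 1 by ring] at hprime ⊢
        rw [pvTau_prime_pow _ _ (by simpa using hprime)]
      have := pvTau_mul_eq n m i hn hm (by omega) hmin hmax
      rw [if_pos hm1]
      simp only [hres, this, htm]
    · have hm1' : m = 1 := by omega
      rw [if_neg hm1]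
      subst hm1'
      simp only [Nat.div_one] at hres
      simp [hres]
  | succ cnt ih =>
    intro i m res hi h1 hm hmin hmax hres hcnt
    rw [List.range'_succ]
    by_cases hmod : m % i = 0
    · -- i divides m; i must be prime
      have hidvd : i ∣ m := Nat.dvd_of_mod_eq_zero hmod
      have hiprime : i.Prime := prime_of_min i m hi hidvd h1 hmin
      obtain ⟨e1, e2, e3⟩ := natDivOut_spec m m i hi h1 (le_refl m)
      set q := natDivOut m m i with hq
      -- new remaining value q.1 and its facts
      have hq1m : q.1 ∣ m := ⟨i ^ q.2, e1⟩
      have hq1n : q.1 ∣ n := dvd_trans hq1m hm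
      have hd1 : 1 ≤ q.2 := by
        rcases Nat.eq_zero_or_pos q.2 with h0 | h0
        · exfalso; apply e2; rw [h0, pow_zero, mul_one] at e1; rw [e1] at hidvd; exact hidvd
        · exact h0
      have hco : n / q.1 = (n / m) * i ^ q.2 := by
        have hnm : n / m * m = n := Nat.div_mul_cancel hm
        have hmul : n = (n / m * i ^ q.2) * q.1 := by
          rw [mul_assoc, mul_comm (i ^ q.2) q.1, ← e1]; omega
        exact Nat.div_eq_of_eq_mul_left (by omega) hmul
      have hmin' : ∀ p, p.Prime → p ∣ q.1 → i + 1 ≤ p := by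
        intro p pp pd
        have hip : i ≤ p := hmin p pp (dvd_trans pd hq1m)
        rcases Nat.lt_or_ge i p with h | h
        · omega
        · exfalso; have : p = i := by omega
          subst this; exact e2 pd
      have hmax' : ∀ p, p.Prime → p ∣ (n / q.1) → p < i + 1 := by
        intro p pp pd
        rw [hco] at pd
        rcases (Nat.Prime.dvd_mul pp).mp pd with h | h
        · have := hmax p pp h; omega
        · have : p = i := (Nat.Prime.dvd_of_dvd_pow pp h) |> fun hpi =>
            (Nat.prime_dvd_prime_iff_eq pp hiprime).mp hpi
          omega
      have hres' : res * (q.2 + 1) = pvTau (n / q.1) := by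
        rw [hco]
        have hcop : Nat.Coprime (n / m) (i ^ q.2) := by
          apply coprime_of_sep _ _ i hmax
          intro p pp pd
          have : p = i := (Nat.prime_dvd_prime_iff_eq pp hiprime).mp (Nat.Prime.dvd_of_dvd_pow pp pd)
          omega
        rw [show pvTau ((n / m) * i ^ q.2) = pvTau (n / m) * pvTau (i ^ q.2) from
          Nat.Coprime.card_divisors_mul hcop]
        rw [pvTau_prime_pow _ _ hiprime, hres]
      simp only [natLoopA, hmod, if_true, ← hq]
      by_cases h9 : 9 < res * (q.2 + 1)
      · rw [if_pos h9]
        have hτ : pvTau n = pvTau (n / q.1) * pvTau q.1 :=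
          pvTau_mul_eq n q.1 (i + 1) hn hq1n e3 hmin' hmax'
        have hpos : 1 ≤ pvTau q.1 := pvTau_pos _ (by omega)
        have : pvTau n ≠ 9 := by
          have : res * (q.2 + 1) ≤ pvTau n := by
            rw [hτ, ← hres']
            calc res * (q.2 + 1) = res * (q.2 + 1) * 1 := by ring
              _ ≤ res * (q.2 + 1) * pvTau q.1 := Nat.mul_le_mul_left _ hpos
          omega
        simp [natFinish, this]
      · rw [if_neg h9]
        by_cases h1' : q.1 = 1
        · rw [if_pos h1']
          have : n / q.1 = n := by rw [h1', Nat.div_one]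
          rw [this] at hres'
          simp [natFinish, h1', hres']
        · rw [if_neg h1']
          exact ih (i + 1) q.1 (res * (q.2 + 1)) (by omega) (by omega) hq1n hmin' hmax'
            hres' (by omega)
    · -- i does not divide m
      simp only [natLoopA, hmod, if_false]
      by_cases h1' : m = 1
      · rw [if_pos h1']
        subst h1'
        simp only [Nat.div_one] at hres
        simp [natFinish, hres]
      · rw [if_neg h1']
        have hmin' : ∀ p, p.Prime → p ∣ m → i + 1 ≤ p := by
          intro p pp pd
          have hip : i ≤ p := hmin p pp pd
          rcases Nat.lt_or_ge i p with h | h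
          · omega
          · exfalso
            have : p = i := by omega
            subst this
            exact hmod (Nat.mod_eq_zero_of_dvd pd)
        have hmax' : ∀ p, p.Prime → p ∣ (n / m) → p < i + 1 := by
          intro p pp pd; have := hmax p pp pd; omega
        exact ih (i + 1) m res (by omega) h1 hm hmin' hmax' hres (by omega)

-- fold = 0 + sum of weights
theorem foldl_count (n : Nat) : ∀ (l : List Nat) (c : Nat),
    l.foldl (fun c i => if n % i = 0 then (if i ≠ n / i then (c+1)+1 else c+1) else c) c
      = c + (l.map (fun i => if n % i = 0 then (if i ≠ n / i then 2 else 1) else 0)).sum := by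
  intro l
  induction l with
  | nil => intro c; simp
  | cons i rest ih =>
    intro c
    simp only [List.foldl_cons, List.map_cons, List.sum_cons]
    rcases Decidable.em (n % i = 0) with h | h
    · rcases Decidable.em (i = n / i) with h2 | h2
      · rw [if_pos h, if_pos h, if_neg (fun hc => hc h2), if_neg (fun hc => hc h2), ih]; omega
      · rw [if_pos h, if_pos h, if_pos h2, if_pos h2, ih]; omega
    · rw [if_neg h, if_neg h, ih]; omega

theorem sum_range'_eq (f : Nat → Nat) : ∀ (r : Nat),
    ((List.range' 1 r).map f).sum = ∑ i ∈ Finset.Ico 1 (r+1), f i := by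
  intro r
  induction r with
  | zero => simp
  | succ r ih =>
    rw [List.range'_1_concat, List.map_append, List.sum_append,
      Finset.sum_Ico_succ_top (by omega), ih]
    simp [Nat.add_comm 1 r]

-- B's count characterisation
theorem countB_eq_tau (n : Nat) (hn : 1 ≤ n) :
    (List.range' 1 (Nat.sqrt n)).foldl
      (fun c i => if n % i = 0 then (if i ≠ n / i then (c+1)+1 else c+1) else c) 0 = pvTau n := by
  have hn0 : n ≠ 0 := by omega
  set r := Nat.sqrt n with hr
  have hrpos : 0 < r := Nat.sqrt_pos.mpr (by omega)
  rw [foldl_count, sum_range'_eq, Nat.zero_add]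
  -- pointwise rewrite of the weight
  have hpt : ∀ i ∈ Finset.Ico 1 (r+1),
      (if n % i = 0 then (if i ≠ n / i then 2 else 1) else 0)
        = (if i ∣ n then 1 else 0) + (if i ∣ n ∧ ¬ i * i = n then 1 else 0) := by
    intro i hi
    rw [Finset.mem_Ico] at hi
    by_cases hd : i ∣ n
    · have hm : n % i = 0 := Nat.mod_eq_zero_of_dvd hd
      have hiff : i ≠ n / i ↔ ¬ i * i = n := by
        constructor
        · intro hne hsq
          exact hne (by rw [← hsq, Nat.mul_div_cancel _ (by omega)])
        · intro hne heq
          apply hne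
          nth_rewrite 2 [heq]
          exact Nat.mul_div_cancel' hd
      by_cases hs : i * i = n
      · simp [hm, hd, hs, hiff]
      · simp [hm, hd, hs, hiff]
    · have hm : n % i ≠ 0 := fun h => hd (Nat.dvd_of_mod_eq_zero h)
      simp [hm, hd]
  rw [Finset.sum_congr rfl hpt, Finset.sum_add_distrib, ← Finset.card_filter, ← Finset.card_filter]
  -- identify the two filters with filters of divisors
  have hS1 : Finset.filter (fun i => i ∣ n) (Finset.Ico 1 (r+1))
      = Finset.filter (fun d => d ≤ r) n.divisors := by
    ext a
    simp only [Finset.mem_filter, Finset.mem_Ico, Nat.mem_divisors]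
    constructor
    · rintro ⟨⟨ha1, ha2⟩, hd⟩; exact ⟨⟨hd, hn0⟩, by omega⟩
    · rintro ⟨⟨hd, _⟩, hle⟩
      have : a ≠ 0 := by rintro rfl; exact hn0 (Nat.eq_zero_of_zero_dvd hd)
      exact ⟨⟨by omega, by omega⟩, hd⟩
  have hS2 : (Finset.filter (fun i => i ∣ n ∧ ¬ i * i = n) (Finset.Ico 1 (r+1))).card
      = (Finset.filter (fun d => ¬ d ≤ r) n.divisors).card := by
    apply Finset.card_nbij' (fun d => n / d) (fun d => n / d)
    · -- maps to
      intro d hd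
      simp only [Finset.coe_filter, Set.mem_setOf_eq, Finset.mem_Ico, Nat.mem_divisors] at hd ⊢
      obtain ⟨⟨hd1, hd2⟩, hdvd, hne⟩ := hd
      have hdd : n = d * (n / d) := (Nat.mul_div_cancel' hdvd).symm
      refine ⟨⟨Nat.div_dvd_of_dvd hdvd, hn0⟩, ?_⟩
      intro hle
      have h1 : n ≤ d * r := by
        calc n = d * (n / d) := hdd
          _ ≤ d * r := Nat.mul_le_mul_left d hle
      have h2 : d * r ≤ r * r := Nat.mul_le_mul_right r (by omega)
      have h3 : r * r ≤ n := Nat.sqrt_le n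
      have hdr : d = r := by
        rcases Nat.lt_or_ge d r with h | h
        · exfalso
          have : d * r < r * r := (Nat.mul_lt_mul_right hrpos).mpr h
          omega
        · omega
      apply hne
      have hdd2 : d * d ≤ n := by
        calc d * d ≤ d * r := Nat.mul_le_mul_left d (by omega)
          _ ≤ r * r := h2
          _ ≤ n := h3
      have : n ≤ d * d := by rw [hdd]; exact Nat.mul_le_mul_left d (by omega)
      omega
    · -- maps from
      intro e he
      simp only [Finset.coe_filter, Set.mem_setOf_eq, Finset.mem_Ico, Nat.mem_divisors] at he ⊢
      obtain ⟨⟨hdvd, _⟩, hgt⟩ := he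
      have he0 : e ≠ 0 := by rintro rfl; exact hn0 (Nat.eq_zero_of_zero_dvd hdvd)
      have hd1 : 1 ≤ n / e := Nat.div_pos (Nat.le_of_dvd (by omega) hdvd) (by omega)
      have hdd : n = e * (n / e) := (Nat.mul_div_cancel' hdvd).symm
      have hub : n < (r+1) * (r+1) := by
        simpa [Nat.succ_eq_add_one] using Nat.lt_succ_sqrt n
      have hle : n / e ≤ r := by
        by_contra hgt2
        have : (r+1) * (r+1) ≤ n := by
          calc (r+1) * (r+1) ≤ e * (n / e) := Nat.mul_le_mul (by omega) (by omega)
            _ = n := hdd.symm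
        omega
      refine ⟨⟨by omega, by omega⟩, Nat.div_dvd_of_dvd hdvd, ?_⟩
      intro hsq
      have h1 : e * (n / e) = n := Nat.mul_div_cancel' hdvd
      have hmul : e * (n / e) = (n / e) * (n / e) := by rw [h1, hsq]
      have he2 : e = n / e := Nat.eq_of_mul_eq_mul_right (by omega) hmul
      omega
    · intro d hd
      simp only [Finset.coe_filter, Set.mem_setOf_eq, Finset.mem_Ico] at hd
      exact Nat.div_div_self hd.2.1 hn0
    · intro e he
      simp only [Finset.coe_filter, Set.mem_setOf_eq, Nat.mem_divisors] at he
      exact Nat.div_div_self he.1.1 hn0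
  rw [hS1, hS2, Finset.card_filter_add_card_filter_not]
  rfl

-- the pyRange lists are casts of Nat ranges
theorem pyRange_cast (a b : Nat) (hab : a ≤ b + 1) :
    PySem.List.pyRange (a : Int) ((b : Int) + 1) 1
      = (List.range' a (b + 1 - a)).map (Nat.cast) := by
  rw [PySem.List.pyRange_one, List.range'_eq_map_range, List.map_map]
  have : ((b : Int) + 1 - (a : Int)).toNat = b + 1 - a := by omega
  rw [this]
  apply List.map_congr_left
  intro k _
  simp only [Function.comp_apply]
  push_cast
  ring

theorem check_eq (n : Nat) (hn : 1 ≤ n) : check (n : Int) = decide (pvTau n = 9) := by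
  have hr : 1 ≤ Nat.sqrt n := Nat.sqrt_pos.mpr (by omega)
  set r := Nat.sqrt n with hrdef
  have hlist : PySem.List.pyRange 2 ((r : Int) + 1) 1 = (List.range' 2 (r - 1)).map Nat.cast := by
    have := pyRange_cast 2 r (by omega)
    rw [show r + 1 - 2 = r - 1 by omega] at this
    exact this
  have hinv := natLoopA_invariant n hn (r - 1) 2 n 1 (by omega) hn (dvd_refl n)
    (fun p pp _ => pp.two_le)
    (by intro p pp pd
        rw [Nat.div_self (by omega)] at pd
        have h1 := Nat.dvd_one.mp pd
        have := pp.one_lt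
        omega)
    (by rw [Nat.div_self (by omega)]; exact pvTau_one.symm)
    (by omega)
  unfold check
  rw [show pvISqrt (n : Int) = (r : Int) by unfold pvISqrt; rw [Int.toNat_natCast, hrdef]]
  rw [hlist]
  have hc := natLoopA_cast (List.range' 2 (r - 1)) n 1
  rw [show ((1 : Nat) : Int) = 1 by norm_num] at hc
  rw [hc]
  rcases hres : natLoopA (List.range' 2 (r - 1)) n 1 with b | ⟨m', res'⟩
  · rw [hres] at hinv
    simpa [natFinish] using hinv
  · rw [hres] at hinv
    simp only [natFinish] at hinv
    show decide ((if (1 : Int) < (m' : Int) then (res' : Int) * 2 else (res' : Int)) = 9)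
        = decide (pvTau n = 9)
    rw [← hinv, decide_eq_decide]
    by_cases hm : 1 < m'
    · have hm' : (1 : Int) < (m' : Int) := by exact_mod_cast hm
      rw [if_pos hm, if_pos hm']
      exact_mod_cast Iff.rfl
    · have hm' : ¬ (1 : Int) < (m' : Int) := by exact_mod_cast hm
      rw [if_neg hm, if_neg hm']
      exact_mod_cast Iff.rfl

-- cast lemma for B's fold
theorem foldB_cast (n : Nat) : ∀ (l : List Nat) (c : Nat),
    (l.map Nat.cast).foldl
      (fun count i =>
        if PySem.Int.mod (n : Int) i = 0 then
          if i ≠ PySem.Int.floordiv (n : Int) i then (count + 1) + 1 else count + 1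
        else count) (c : Int)
      = ((l.foldl (fun c i => if n % i = 0 then (if i ≠ n / i then (c+1)+1 else c+1) else c) c
          : Nat) : Int) := by
  intro l
  induction l with
  | nil => intro c; simp
  | cons i rest ih =>
    intro c
    simp only [List.map_cons, List.foldl_cons]
    rcases Decidable.em (n % i = 0) with h | h
    · have hm : PySem.Int.mod (n : Int) (i : Int) = 0 := by
        rw [PySem.Int.mod_natCast, h]; rfl
      have hf : PySem.Int.floordiv (n : Int) (i : Int) = ((n / i : Nat) : Int) :=
        PySem.Int.floordiv_natCast n i
      rw [if_pos hm, if_pos h, hf]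
      rcases Decidable.em (i = n / i) with h2 | h2
      · have h2' : ((i : Nat) : Int) = ((n / i : Nat) : Int) := by exact_mod_cast h2
        rw [if_neg (fun hc => hc h2'), if_neg (fun hc => hc h2)]
        exact_mod_cast ih (c + 1)
      · have h2' : ((i : Nat) : Int) ≠ ((n / i : Nat) : Int) := by exact_mod_cast h2
        rw [if_pos h2', if_pos h2]
        exact_mod_cast ih (c + 1 + 1)
    · have hm : PySem.Int.mod (n : Int) (i : Int) ≠ 0 := by
        rw [PySem.Int.mod_natCast]; exact_mod_cast h
      rw [if_neg hm, if_neg h]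
      exact ih c

theorem check_alt_eq (n : Nat) (hn : 1 ≤ n) : check_alt (n : Int) = decide (pvTau n = 9) := by
  set r := Nat.sqrt n with hrdef
  have hlist : PySem.List.pyRange 1 ((r : Int) + 1) 1 = (List.range' 1 r).map Nat.cast := by
    have := pyRange_cast 1 r (by omega)
    rw [show r + 1 - 1 = r by omega] at this
    exact this
  unfold check_alt
  rw [show pvISqrt (n : Int) = (r : Int) by unfold pvISqrt; rw [Int.toNat_natCast, hrdef]]
  rw [hlist]
  have hc := foldB_cast n (List.range' 1 r) 0
  rw [show ((0 : Nat) : Int) = 0 by norm_num] at hc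
  rw [hc]
  rw [countB_eq_tau n hn]
  rw [decide_eq_decide]
  exact_mod_cast Iff.rfl

-- ===== VERDICT (by name: the statement is the Claim_ definition above) =====
theorem check_spec : Claim_equal_check := by
  intro m _ hpre
  unfold Spec_check
  obtain ⟨n, rfl⟩ := Int.eq_ofNat_of_zero_le hpre
  rcases Nat.eq_zero_or_pos n with h0 | h0
  · subst h0; decide
  · rw [check_eq n h0, check_alt_eq n h0]
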